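-- pv_equiv track=rewrite | github.com/swkim-sm/practice | codingTest/Programmers/풍선 터뜨리기/시간초과코드.py | solution
-- ===== SOURCE A (Python) =====
-- def solution(a):
--     answer = 0
--     for idx, val in enumerate(a):
--         tmp_ahead = sorted(a[:idx])
--         tmp_behind = sorted(a[idx+1:])
--
--         if tmp_ahead and tmp_behind and val > tmp_ahead[0] and val > tmp_behind[0]:
--             continue
--         else:
--             answer += 1
--
--     return answer
-- ===== SOURCE B (Python) =====
-- def solution(a):
--     # suffix minima: suf[i] = min(a[i+1:]) as a running value, None when empty
--     suf = []
--     m = None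
--     for v in reversed(a):
--         suf.append(m)
--         m = v if m is None or v < m else m
--     suf.reverse()
--     answer = 0
--     pre = None
--     for v, s in zip(a, suf):
--         if pre is None or s is None or v <= pre or v <= s:
--             answer += 1
--         pre = v if pre is None or v < pre else pre
--     return answer
-- ===== Notes on version B (the rewrite author's own statement) =====
-- stated objective: faster
-- what changed: Replaces per-index sorting of both slices (O(n^2 log n)) with a suffix-minima pass plus a single forward pass carrying a running prefix minimum (O(n)).
import Mathlib
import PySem

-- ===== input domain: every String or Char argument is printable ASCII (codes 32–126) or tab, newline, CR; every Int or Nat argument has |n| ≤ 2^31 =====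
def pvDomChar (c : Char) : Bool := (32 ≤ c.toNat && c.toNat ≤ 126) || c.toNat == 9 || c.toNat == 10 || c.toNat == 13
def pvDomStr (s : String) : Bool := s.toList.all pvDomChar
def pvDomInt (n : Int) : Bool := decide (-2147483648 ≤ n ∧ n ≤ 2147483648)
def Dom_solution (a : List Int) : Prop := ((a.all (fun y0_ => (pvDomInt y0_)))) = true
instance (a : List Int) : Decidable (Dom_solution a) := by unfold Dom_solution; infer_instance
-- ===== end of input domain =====

-- B replaces A's per-index sorting of both slices by a suffix-minima pass and a
-- running prefix minimum: one O(n) scan instead of O(n^2 log n) re-sorting.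

-- ===== PORT A =====
def solution (a : List Int) : Int :=
  (PySem.List.enumerate a 0).foldl (fun answer p =>
    let idx := p.1
    let val := p.2
    let tmp_ahead := PySem.List.sorted (PySem.List.slice a none (some idx)) (fun x => x) false
    let tmp_behind := PySem.List.sorted (PySem.List.slice a (some (idx + 1)) none) (fun x => x) false
    if tmp_ahead ≠ [] ∧ tmp_behind ≠ [] ∧
        PySem.List.pyGetD tmp_ahead 0 0 < val ∧ PySem.List.pyGetD tmp_behind 0 0 < val then
      answer
    else
      answer + 1) 0

-- ===== PORT B =====
def solution_alt (a : List Int) : Int :=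
  let st := a.reverse.foldl
    (fun (st : List (Option Int) × Option Int) v =>
      let suf := st.1
      let m := st.2
      (suf ++ [m], some (match m with | none => v | some y => if v < y then v else y)))
    ([], none)
  let suf := st.1.reverse
  let fin := (a.zip suf).foldl
    (fun (st : Int × Option Int) vs =>
      let answer := st.1
      let pre := st.2
      let v := vs.1
      let s := vs.2
      let answer :=
        if pre = none ∨ s = none ∨ (∃ y, pre = some y ∧ v ≤ y) ∨ (∃ y, s = some y ∧ v ≤ y) then
          answer + 1
        else answer
      (answer, some (match pre with | none => v | some y => if v < y then v else y)))
    (0, none)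
  fin.1

-- ===== PRECONDITION & SPEC =====
def Spec_solution (a : List Int) (out : Int) : Prop := out = solution_alt a
instance (a : List Int) (out : Int) : Decidable (Spec_solution a out) := by unfold Spec_solution; infer_instance

-- ===== CLAIM (what is proved, stated in full; the proofs are below) =====
def Claim_equal_solution : Prop := ∀ (a : List Int), Dom_solution a → Spec_solution a (solution a)

-- ===== LEMMAS AND PROOFS =====

/-- Combine an optional running minimum with a new element (B's update step). -/
def pmin (p : Option Int) (v : Int) : Option Int :=
  some (match p with | none => v | some y => if v < y then v else y)

/-- Abstract count both programs compute: `p` is the minimum of the already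
    consumed prefix (as an option); an element is counted unless it is strictly
    greater than both the prefix minimum and the suffix minimum. -/
def mid (p : Option Int) : List Int → Int
  | [] => 0
  | v :: rest =>
      (if p = none ∨ PySem.List.min? rest (fun x => x) = none ∨
          (∃ y, p = some y ∧ v ≤ y) ∨
          (∃ y, PySem.List.min? rest (fun x => x) = some y ∧ v ≤ y) then 1 else 0)
        + mid (pmin p v) rest

lemma min?_cons_eq_pmin (v : Int) (rest : List Int) :
    PySem.List.min? (v :: rest) (fun x => x) = pmin (PySem.List.min? rest (fun x => x)) v := by
  cases rest with
  | nil => simp [pmin, PySem.List.min?]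
  | cons x t =>
      rw [PySem.List.min?_id_cons, PySem.List.min?_id_cons]
      simp only [pmin]
      congr 1
      rw [show List.foldl min v (x :: t) = List.foldl min (min v x) t from rfl,
         List.foldl_assoc]
      simp only [min_def]
      split_ifs <;> omega

lemma head_sorted_eq_min (l : List Int) (m : Int)
    (hm : PySem.List.min? l (fun x => x) = some m) :
    ∃ t, PySem.List.sorted l (fun x => x) false = m :: t := by
  have hl : l ≠ [] := by
    intro h; subst h; simp [PySem.List.min?] at hm
  have hs : PySem.List.sorted l (fun x => x) false ≠ [] := by
    simpa [PySem.List.sorted_eq_nil_iff] using hl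
  obtain ⟨h, t, hht⟩ := List.exists_cons_of_ne_nil hs
  have hmem : h ∈ l := by
    have : h ∈ PySem.List.sorted l (fun x => x) false := by rw [hht]; simp
    simpa [PySem.List.mem_sorted] using this
  have h1 : m ≤ h := PySem.List.min?_isMin hm h hmem
  have h2 : h ≤ m := PySem.List.key_head_sorted_le l (fun x => x) hht m (PySem.List.min?_mem hm)
  have : h = m := le_antisymm h2 h1
  exact ⟨t, by rw [hht, this]⟩

/-- A's loop, generalized over the consumed prefix. -/
lemma A_loop (cur : List Int) : ∀ (pre : List Int) (ans : Int),
    (PySem.List.enumerate cur ((pre.length : Int))).foldl (fun answer p =>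
      let idx := p.1
      let val := p.2
      let tmp_ahead := PySem.List.sorted (PySem.List.slice (pre ++ cur) none (some idx)) (fun x => x) false
      let tmp_behind := PySem.List.sorted (PySem.List.slice (pre ++ cur) (some (idx + 1)) none) (fun x => x) false
      if tmp_ahead ≠ [] ∧ tmp_behind ≠ [] ∧
          PySem.List.pyGetD tmp_ahead 0 0 < val ∧ PySem.List.pyGetD tmp_behind 0 0 < val then
        answer
      else
        answer + 1) ans
    = ans + mid (PySem.List.min? pre (fun x => x)) cur := by
  induction cur with
  | nil => intro pre ans; simp [PySem.List.enumerate, mid]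
  | cons v rest ih =>
      intro pre ans
      rw [PySem.List.enumerate_cons, List.foldl_cons]
      have hsl1 : PySem.List.slice (pre ++ v :: rest) none (some ((pre.length : Int))) = pre := by
        rw [PySem.List.slice_to_natCast]; exact List.take_left
      have hsl2 : PySem.List.slice (pre ++ v :: rest) (some ((pre.length : Int) + 1)) none = rest := by
        have h1 : ((pre.length : Int) + 1) = (((pre ++ [v]).length : Nat) : Int) := by
          push_cast [List.length_append, List.length_cons, List.length_nil]; ring
        rw [h1, PySem.List.slice_from_natCast]
        have h2 : pre ++ v :: rest = (pre ++ [v]) ++ rest := by simp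
        rw [h2]; exact List.drop_left
      have harg : pre ++ v :: rest = (pre ++ [v]) ++ rest := by simp
      have hstep : ∀ ans' : Int,
          (if PySem.List.sorted (PySem.List.slice (pre ++ v :: rest) none (some ((pre.length : Int)))) (fun x => x) false ≠ [] ∧
              PySem.List.sorted (PySem.List.slice (pre ++ v :: rest) (some ((pre.length : Int) + 1)) none) (fun x => x) false ≠ [] ∧
              PySem.List.pyGetD (PySem.List.sorted (PySem.List.slice (pre ++ v :: rest) none (some ((pre.length : Int)))) (fun x => x) false) 0 0 < v ∧
              PySem.List.pyGetD (PySem.List.sorted (PySem.List.slice (pre ++ v :: rest) (some ((pre.length : Int) + 1)) none) (fun x => x) false) 0 0 < v then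
            ans'
          else ans' + 1)
          = ans' + (if PySem.List.min? pre (fun x => x) = none ∨ PySem.List.min? rest (fun x => x) = none ∨
              (∃ y, PySem.List.min? pre (fun x => x) = some y ∧ v ≤ y) ∨
              (∃ y, PySem.List.min? rest (fun x => x) = some y ∧ v ≤ y) then 1 else 0) := by
        intro ans'
        rw [hsl1, hsl2]
        rcases hp : PySem.List.min? pre (fun x => x) with _ | mp
        · have hpre : pre = [] := (PySem.List.min?_eq_none_iff _ _).mp hp
          simp [hpre, PySem.List.sorted_eq_nil_iff]
        · obtain ⟨tp, hpt⟩ := head_sorted_eq_min pre mp hp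
          rcases hs : PySem.List.min? rest (fun x => x) with _ | ms
          · have hrest : rest = [] := (PySem.List.min?_eq_none_iff _ _).mp hs
            simp [hrest, PySem.List.sorted_eq_nil_iff]
          · obtain ⟨ts, hst⟩ := head_sorted_eq_min rest ms hs
            rw [hpt, hst]
            simp only [PySem.List.pyGetD_zero_cons]
            by_cases h1 : mp < v <;> by_cases h2 : ms < v <;>
              simp [h1, h2]
      rw [hstep]
      have hlen : ((pre.length : Int) + 1) = (((pre ++ [v]).length : Nat) : Int) := by
        push_cast [List.length_append, List.length_cons, List.length_nil]; ring
      rw [hlen]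
      conv_lhs =>
        rw [show pre ++ v :: rest = (pre ++ [v]) ++ rest from harg]
      rw [ih (pre ++ [v])]
      have hmin : PySem.List.min? (pre ++ [v]) (fun x => x) = pmin (PySem.List.min? pre (fun x => x)) v := by
        cases pre with
        | nil => simp [pmin, PySem.List.min?]
        | cons x t =>
            rw [show (x :: t) ++ [v] = x :: (t ++ [v]) from rfl,
               PySem.List.min?_id_cons, PySem.List.min?_id_cons]
            simp only [pmin, List.foldl_append]
            congr 1
            simp only [List.foldl_cons, List.foldl_nil, min_def]
            split_ifs <;> omega
      rw [hmin]
      simp [mid]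
      ring

lemma solution_eq_mid (a : List Int) : solution a = mid none a := by
  have h := A_loop a [] 0
  simp only [List.nil_append, List.length_nil, Nat.cast_zero] at h
  have hne : PySem.List.min? ([] : List Int) (fun x => x) = none := by
    simp [PySem.List.min?]
  rw [hne] at h
  simpa [solution] using h

/-- suffix minima: `sufs a`[j] = min of `a` after position j, as an option. -/
def sufs : List Int → List (Option Int)
  | [] => []
  | _ :: rest => PySem.List.min? rest (fun x => x) :: sufs rest

lemma B_first_loop (a : List Int) :
    a.reverse.foldl
      (fun (st : List (Option Int) × Option Int) v =>
        let suf := st.1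
        let m := st.2
        (suf ++ [m], some (match m with | none => v | some y => if v < y then v else y)))
      ([], none)
    = ((sufs a).reverse, PySem.List.min? a (fun x => x)) := by
  induction a with
  | nil => simp [sufs, PySem.List.min?]
  | cons v rest ih =>
      simp only [List.reverse_cons, List.foldl_append, ih, List.foldl_cons, List.foldl_nil]
      rw [min?_cons_eq_pmin]
      simp [sufs, pmin]

lemma B_second_loop (a : List Int) : ∀ (ans : Int) (p : Option Int),
    ((a.zip (sufs a)).foldl
      (fun (st : Int × Option Int) vs =>
        let answer := st.1
        let pre := st.2
        let v := vs.1
        let s := vs.2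
        let answer :=
          if pre = none ∨ s = none ∨ (∃ y, pre = some y ∧ v ≤ y) ∨ (∃ y, s = some y ∧ v ≤ y) then
            answer + 1
          else answer
        (answer, some (match pre with | none => v | some y => if v < y then v else y)))
      (ans, p)).1 = ans + mid p a := by
  induction a with
  | nil => intro ans p; simp [sufs, mid]
  | cons v rest ih =>
      intro ans p
      simp only [sufs, List.zip_cons_cons, List.foldl_cons]
      rw [ih]
      simp only [mid, pmin]
      split_ifs <;> ring

lemma solution_alt_eq_mid (a : List Int) : solution_alt a = mid none a := by
  unfold solution_alt
  rw [B_first_loop]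
  simpa using B_second_loop a 0 none

-- ===== VERDICT (by name: the statement is the Claim_ definition above) =====
theorem solution_spec : Claim_equal_solution := by
  intro a _
  unfold Spec_solution
  rw [solution_eq_mid, solution_alt_eq_mid]
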